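-- pv_equiv track=rewrite | github.com/cmbenello/141-discussion | solutions/conditional_loops_sols.py | cl_20_diamond_odd
-- ===== SOURCE A (Python) =====
-- def cl_20_diamond_odd(n: int) -> str:
--     """
--     Diamond of '*' with odd n (number of rows). Raises ValueError for n<=0 or even.
--     """
--     if n <= 0 or n % 2 == 0:
--         raise ValueError("n must be positive odd")
--     lines = []
--     mid = n // 2
--     # upper (including middle)
--     for i in range(0, mid + 1):
--         stars = 2 * i + 1
--         spaces = mid - i
--         lines.append(" " * spaces + "*" * stars)
--     # lower
--     for i in range(mid - 1, -1, -1):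
--         stars = 2 * i + 1
--         spaces = mid - i
--         lines.append(" " * spaces + "*" * stars)
--     return "\n".join(lines)
-- ===== SOURCE B (Python) =====
-- def cl_20_diamond_odd(n: int) -> str:
--     """
--     Diamond of '*' with odd n: every row j has a closed form via d = abs(mid - j):
--     d leading spaces and n - 2*d stars. One pass over all n rows, no mirroring.
--     """
--     if n <= 0 or n % 2 == 0:
--         raise ValueError("n must be positive odd")
--     mid = n // 2
--     return "\n".join(" " * (d := abs(mid - j)) + "*" * (n - 2 * d) for j in range(n))
-- ===== Notes on version B (the rewrite author's own statement) =====
-- stated objective: simpler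
-- what changed: B replaces A's two mirrored loops (upper half built up, lower half counted back down) by a single pass over all n row indices, computing each row directly from the closed form d = abs(mid - j): d spaces then n - 2*d stars.
import Mathlib
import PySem

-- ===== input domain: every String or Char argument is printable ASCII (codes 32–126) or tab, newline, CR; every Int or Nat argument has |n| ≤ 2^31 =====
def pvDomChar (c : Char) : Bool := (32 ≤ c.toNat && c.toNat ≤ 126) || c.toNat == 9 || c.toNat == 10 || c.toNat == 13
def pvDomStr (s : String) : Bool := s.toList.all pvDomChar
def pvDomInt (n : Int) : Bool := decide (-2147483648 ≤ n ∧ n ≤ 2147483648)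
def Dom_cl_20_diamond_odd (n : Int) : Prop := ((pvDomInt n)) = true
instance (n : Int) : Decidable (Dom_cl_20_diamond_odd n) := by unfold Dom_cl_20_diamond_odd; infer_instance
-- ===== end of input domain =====

-- B computes each of the n rows directly from the closed form d = |mid - j| (d spaces, n - 2d stars)
-- in one pass, instead of A's two mirrored loops; objective: simpler.

-- ===== PORT A =====
def cl_20_diamond_odd (n : Int) : String :=
  if n ≤ 0 ∨ PySem.Int.mod n 2 = 0 then ""  -- Python raises ValueError here; excluded by Pre_
  else
    let mid := PySem.Int.floordiv n 2
    -- upper (including middle)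
    let lines₁ := (PySem.List.pyRange 0 (mid + 1) 1).foldl
      (fun acc i =>
        acc ++ [String.ofList (PySem.List.pyRepeat [' '] (mid - i) ++ PySem.List.pyRepeat ['*'] (2 * i + 1))]) []
    -- lower
    let lines₂ := (PySem.List.pyRange (mid - 1) (-1) (-1)).foldl
      (fun acc i =>
        acc ++ [String.ofList (PySem.List.pyRepeat [' '] (mid - i) ++ PySem.List.pyRepeat ['*'] (2 * i + 1))]) lines₁
    PySem.Str.join "\n" lines₂

-- ===== PORT B =====
def cl_20_diamond_odd_alt (n : Int) : String :=
  if n ≤ 0 ∨ PySem.Int.mod n 2 = 0 then ""  -- Python raises ValueError here; excluded by Pre_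
  else
    let mid := PySem.Int.floordiv n 2
    PySem.Str.join "\n" ((PySem.List.pyRange 0 n 1).map
      (fun j =>
        let d := |mid - j|
        String.ofList (PySem.List.pyRepeat [' '] d ++ PySem.List.pyRepeat ['*'] (n - 2 * d))))

-- ===== PRECONDITION & SPEC =====
-- Pre_: exactly the inputs where A returns (A raises ValueError for n ≤ 0 or even n)
def Pre_cl_20_diamond_odd (n : Int) : Prop := 0 < n ∧ n % 2 = 1
instance (n : Int) : Decidable (Pre_cl_20_diamond_odd n) := by unfold Pre_cl_20_diamond_odd; infer_instance
def pvWitness_cl_20_diamond_odd : Int := 5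

def Spec_cl_20_diamond_odd (n : Int) (out : String) : Prop := out = cl_20_diamond_odd_alt n
instance (n : Int) (out : String) : Decidable (Spec_cl_20_diamond_odd n out) := by unfold Spec_cl_20_diamond_odd; infer_instance

-- ===== CLAIM (what is proved, stated in full; the proofs are below) =====
def Claim_equal_cl_20_diamond_odd : Prop := ∀ (n : Int), Dom_cl_20_diamond_odd n → Pre_cl_20_diamond_odd n → Spec_cl_20_diamond_odd n (cl_20_diamond_odd n)

-- ===== LEMMAS AND PROOFS =====

theorem cl_20_diamond_odd_key (n : Int) (hpos : 0 < n) (hodd : n % 2 = 1) :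
    cl_20_diamond_odd n = cl_20_diamond_odd_alt n := by
  have hguard : ¬ (n ≤ 0 ∨ PySem.Int.mod n 2 = 0) := by
    rw [PySem.Int.mod_eq_emod_of_pos (by norm_num)]
    omega
  unfold cl_20_diamond_odd cl_20_diamond_odd_alt
  rw [if_neg hguard, if_neg hguard]
  have hmid : PySem.Int.floordiv n 2 = n / 2 := PySem.Int.floordiv_eq_ediv_of_pos (by norm_num)
  simp only [hmid]
  have hm : (0 : Int) ≤ n / 2 := by omega
  have hn : n = 2 * (n / 2) + 1 := by omega
  rw [PySem.List.foldl_append_singleton_eq_map, PySem.List.foldl_append_singleton_eq_map]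
  congr 1
  -- split B's full range at (n/2) + 1
  rw [PySem.List.pyRange_one_append 0 (n / 2 + 1) n (by omega) (by omega), List.map_append]
  congr 1
  · -- upper halves: B's row formula equals A's for 0 ≤ j ≤ n/2
    refine List.map_congr_left ?_
    intro j hj
    rw [PySem.List.mem_pyRange_one] at hj
    have habs : |n / 2 - j| = n / 2 - j := abs_of_nonneg (by omega)
    rw [habs]
    have h1 : n - 2 * (n / 2 - j) = 2 * j + 1 := by omega
    rw [h1]
  · -- lower halves: B's rows for j in [n/2+1, …, n-1] equal A's countdown rows
    rw [PySem.List.pyRange_neg_one, PySem.List.pyRange_one]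
    have hlen : (n - (n / 2 + 1)).toNat = (n / 2 - 1 - (-1)).toNat := by omega
    rw [List.map_map, List.map_map, hlen]
    refine List.map_congr_left ?_
    intro k hk
    rw [List.mem_range] at hk
    have hk' : (k : Int) < n / 2 := by omega
    have habs : |n / 2 - (n / 2 + 1 + (k : Int))| = (k : Int) + 1 := by
      rw [abs_of_nonpos (by omega)]; ring
    simp only [Function.comp]
    rw [habs]
    have h1 : n / 2 - (n / 2 - 1 - (k : Int)) = (k : Int) + 1 := by omega
    have h2 : 2 * (n / 2 - 1 - (k : Int)) + 1 = n - 2 * ((k : Int) + 1) := by omega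
    rw [h1, h2]

-- ===== VERDICT (by name: the statement is the Claim_ definition above) =====
theorem cl_20_diamond_odd_spec : Claim_equal_cl_20_diamond_odd := by
  intro n _ hpre
  exact cl_20_diamond_odd_key n hpre.1 hpre.2
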